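-- pv_equiv track=rewrite | github.com/teqnodux/react_dashboard | backend/proxy_analysis_processor.py | _find_body_start
-- ===== SOURCE A (Python) =====
-- def _find_body_start(lines: list[str]) -> int:
--     """Find the line index after the second ======== line.
--     If no header block exists, returns 0."""
--     eq_count = 0
--     for i, line in enumerate(lines):
--         if line.strip().startswith("===="):
--             eq_count += 1
--             if eq_count >= 2:
--                 return i + 1
--     return 0
-- ===== SOURCE B (Python) =====
-- def _first_header(lines):
--     for i, line in enumerate(lines):
--         if line.strip().startswith("===="):
--             return i
--     return -1
--
-- def _find_body_start(lines: list[str]) -> int: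
--     """Find the line index after the second ======== line.
--     If no header block exists, returns 0."""
--     first = _first_header(lines)
--     if first < 0:
--         return 0
--     second = _first_header(lines[first + 1:])
--     if second < 0:
--         return 0
--     return first + 1 + second + 1
-- ===== Notes on version B (the rewrite author's own statement) =====
-- stated objective: alternative
-- what changed: Replaces A's single pass with a running counter and early exit by two staged first-match searches: a helper finds the first header index, then is applied again to the slice after it; the answers are composed arithmetically.
import Mathlib
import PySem

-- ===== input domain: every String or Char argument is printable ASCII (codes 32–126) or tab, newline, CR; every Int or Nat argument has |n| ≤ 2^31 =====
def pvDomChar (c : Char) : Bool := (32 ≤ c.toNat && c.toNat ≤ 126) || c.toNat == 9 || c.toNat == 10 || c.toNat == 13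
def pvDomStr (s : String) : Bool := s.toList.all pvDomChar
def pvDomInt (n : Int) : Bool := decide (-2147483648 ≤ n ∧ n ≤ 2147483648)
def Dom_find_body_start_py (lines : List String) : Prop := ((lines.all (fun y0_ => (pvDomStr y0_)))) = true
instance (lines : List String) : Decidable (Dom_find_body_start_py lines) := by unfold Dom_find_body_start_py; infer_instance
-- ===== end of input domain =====

-- B replaces A's running counter with two staged first-match searches: find the first
-- header index, then the first header index in the slice after it (different decomposition).

-- ===== PORT A =====
def fbsHdr (line : String) : Bool :=
  PySem.Str.startswith (PySem.Str.strip line) "===="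

def fbsLoopA : List (Int × String) → Int → Int
  | [], _ => 0
  | (i, line) :: rest, eq_count =>
    if fbsHdr line then
      if eq_count + 1 ≥ 2 then i + 1 else fbsLoopA rest (eq_count + 1)
    else fbsLoopA rest eq_count

def find_body_start_py (lines : List String) : Int :=
  fbsLoopA (PySem.List.enumerate lines) 0

-- ===== PORT B =====
-- helper _first_header: first index whose stripped line starts with "====", else -1
def fbsFirstHdr : List (Int × String) → Int
  | [] => -1
  | (i, line) :: rest => if fbsHdr line then i else fbsFirstHdr rest

def find_body_start_py_alt (lines : List String) : Int :=
  let first := fbsFirstHdr (PySem.List.enumerate lines)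
  if first < 0 then 0
  else
    let second := fbsFirstHdr (PySem.List.enumerate (PySem.List.slice lines (some (first + 1)) none))
    if second < 0 then 0
    else first + 1 + second + 1

-- ===== PRECONDITION & SPEC =====
def Spec_find_body_start_py (lines : List String) (out : Int) : Prop := out = find_body_start_py_alt lines
instance (lines : List String) (out : Int) : Decidable (Spec_find_body_start_py lines out) := by unfold Spec_find_body_start_py; infer_instance

-- ===== CLAIM (what is proved, stated in full; the proofs are below) =====
def Claim_equal_find_body_start_py : Prop := ∀ (lines : List String), Dom_find_body_start_py lines → Spec_find_body_start_py lines (find_body_start_py lines)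

-- ===== LEMMAS AND PROOFS =====

-- first-header search over an enumerated list, characterised by findIdx
theorem fbsFirstHdr_enum (l : List String) (s : Int) :
    fbsFirstHdr (PySem.List.enumerate l s) =
      if l.any fbsHdr then s + (l.findIdx fbsHdr : Int) else -1 := by
  induction l generalizing s with
  | nil => rfl
  | cons h t ih =>
    rcases hh : fbsHdr h with _ | _
    · simp only [PySem.List.enumerate_cons, fbsFirstHdr, hh, List.any_cons,
        List.findIdx_cons, Bool.false_or, cond_false, ih]
      by_cases ht : t.any fbsHdr <;> simp [ht] <;> omega
    · simp [PySem.List.enumerate_cons, fbsFirstHdr, hh, List.findIdx_cons]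

-- the intended result stated as: first header, then first header after it
def fbsTwoStage (s : Int) (l : List String) : Int :=
  if l.any fbsHdr then
    let f := l.findIdx fbsHdr
    let rest := l.drop (f + 1)
    if rest.any fbsHdr then s + (f : Int) + (rest.findIdx fbsHdr : Int) + 2 else 0
  else 0

-- A's loop after the first header was counted equals a plain first-match search
theorem fbsLoopA_one (l : List String) (s : Int) :
    fbsLoopA (PySem.List.enumerate l s) 1 =
      if l.any fbsHdr then s + (l.findIdx fbsHdr : Int) + 1 else 0 := by
  induction l generalizing s with
  | nil => rfl
  | cons h t ih =>
    rcases hh : fbsHdr h with _ | _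
    · simp only [PySem.List.enumerate_cons, fbsLoopA, hh, List.any_cons,
        List.findIdx_cons, Bool.false_or, cond_false, ih]
      by_cases ht : t.any fbsHdr <;> simp [ht] <;> omega
    · simp [PySem.List.enumerate_cons, fbsLoopA, hh, List.findIdx_cons]

-- A's full loop equals the two-stage search
theorem fbsLoopA_zero (l : List String) (s : Int) :
    fbsLoopA (PySem.List.enumerate l s) 0 = fbsTwoStage s l := by
  induction l generalizing s with
  | nil => rfl
  | cons h t ih =>
    rcases hh : fbsHdr h with _ | _
    · simp only [PySem.List.enumerate_cons, fbsLoopA, hh, ih, fbsTwoStage,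
        List.any_cons, List.findIdx_cons, Bool.false_or, cond_false]
      by_cases ht : t.any fbsHdr <;>
        by_cases hr : ((t.drop (t.findIdx fbsHdr + 1)).any fbsHdr) <;>
          simp [ht, hr, List.drop_succ_cons] <;> omega
    · have h12 : ¬ ((0 : Int) + 1 ≥ 2) := by omega
      simp only [PySem.List.enumerate_cons, fbsLoopA, hh, if_true,
        zero_add, fbsLoopA_one, fbsTwoStage, List.any_cons, List.findIdx_cons,
        Bool.true_or, cond_true, List.drop_succ_cons, List.drop_zero, Nat.cast_zero]
      by_cases ht : t.any fbsHdr <;> simp [ht] <;> omega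

-- ===== VERDICT (by name: the statement is the Claim_ definition above) =====
theorem find_body_start_py_spec : Claim_equal_find_body_start_py := by
  intro lines _
  unfold Spec_find_body_start_py find_body_start_py find_body_start_py_alt
  rw [fbsLoopA_zero, fbsFirstHdr_enum]
  by_cases hl : lines.any fbsHdr
  · simp only [hl, if_true, fbsTwoStage, zero_add]
    have h1 : ¬ ((lines.findIdx fbsHdr : Int) < 0) := by omega
    have hs : (PySem.List.slice lines (some ((lines.findIdx fbsHdr : Int) + 1)) none)
        = lines.drop (lines.findIdx fbsHdr + 1) := by
      have := PySem.List.slice_from_natCast lines (lines.findIdx fbsHdr + 1)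
      rwa [Nat.cast_add, Nat.cast_one] at this
    simp only [h1, if_false, hs, fbsFirstHdr_enum]
    by_cases hr : (lines.drop (lines.findIdx fbsHdr + 1)).any fbsHdr
    · have h2 : ¬ ((0 : Int) + ((lines.drop (lines.findIdx fbsHdr + 1)).findIdx fbsHdr : Int) < 0) := by omega
      simp only [hr, if_true, h2, if_false]
      omega
    · simp [hr]
  · simp [hl, fbsTwoStage]
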